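-- pv_equiv track=rewrite | github.com/nedosiek/NiDUC_Project_Koder | Galois.py | calculate_polynomial
-- ===== SOURCE A (Python) =====
-- galois_power = 6
--
-- def calculate_polynomial(
--         polynomial: int, x: int, power = galois_power):
--
--         if x not in range(0, 2**power - 1):
--             raise ValueError("provided x in polynomial calculation should be valid symbol in this GF field")
--
--         # tylko reszta przy x^0 ma znaczenie
--         if x == 0:
--             return polynomial & 1 << 0
--
--         sum = 0
--         i = 0
--         while polynomial:
--
--             if i == 0:
--                 sum += polynomial & 1
--             else:
--                 base = x * (polynomial & 1)
--                 pow = base**i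
--                 sum += pow % 2**power
--
--             polynomial >>= 1
--             i += 1
--
--         return sum
-- ===== SOURCE B (Python) =====
-- galois_power = 6
--
-- def calculate_polynomial(polynomial: int, x: int, power=galois_power):
--     if x not in range(0, 2**power - 1):
--         raise ValueError("provided x in polynomial calculation should be valid symbol in this GF field")
--     m = 2**power
--     total = 0
--     xi = 1
--     while polynomial:
--         if polynomial & 1:
--             total += xi
--         xi = xi * x % m
--         polynomial >>= 1
--     return total
-- ===== Notes on version B (the rewrite author's own statement) =====
-- stated objective: faster
-- what changed: Replaces per-term full exponentiation base**i (and the separate x==0 and i==0 special cases) with a single running power xi = x^i mod 2**power threaded through one bit loop, so intermediate numbers stay bounded by 2**power instead of growing with the bit index.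
-- outside the precondition, e.g. on calculate_polynomial(-3, 0, 7): A returns 1, B does not finish within the time limit
import Mathlib
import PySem

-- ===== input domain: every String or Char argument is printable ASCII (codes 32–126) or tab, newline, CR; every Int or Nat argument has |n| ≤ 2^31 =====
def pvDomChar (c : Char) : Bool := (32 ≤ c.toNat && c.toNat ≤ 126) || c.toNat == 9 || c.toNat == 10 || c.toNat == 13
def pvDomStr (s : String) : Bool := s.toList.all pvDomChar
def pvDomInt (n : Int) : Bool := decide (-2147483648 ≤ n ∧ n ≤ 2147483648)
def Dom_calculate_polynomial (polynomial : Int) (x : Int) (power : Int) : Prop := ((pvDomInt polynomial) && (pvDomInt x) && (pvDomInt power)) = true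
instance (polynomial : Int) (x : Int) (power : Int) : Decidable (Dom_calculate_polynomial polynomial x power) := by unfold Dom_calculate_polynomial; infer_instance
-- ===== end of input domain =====

-- B replaces A's per-term full exponentiation base**i (plus its x==0 / i==0 special
-- cases) by one running power xi = x^i mod 2^power threaded through a single bit loop
-- (objective: faster — the intermediate numbers stay below 2^power instead of growing).

-- ===== PORT A =====
-- while-loop of A, recursing on the shifted polynomial (a Nat: Pre_ demands polynomial ≥ 0,
-- since Python's loop would not terminate on a negative polynomial)
def pvALoop (p : Nat) (x m : Int) (i : Nat) (s : Int) : Int :=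
  if hp : p = 0 then s
  else pvALoop (p / 2) x m (i + 1)
    (if i = 0 then s + ((p % 2 : Nat) : Int)
     else s + PySem.Int.mod ((x * ((p % 2 : Nat) : Int)) ^ i) m)
termination_by p
decreasing_by exact Nat.div_lt_self (Nat.pos_of_ne_zero hp) (by omega)

def calculate_polynomial (polynomial : Int) (x : Int) (power : Int) : Int :=
  let m : Int := 2 ^ power.toNat
  if ¬ (0 ≤ x ∧ x < m - 1) then 0       -- Python raises ValueError here; excluded by Pre_
  else if x = 0 then PySem.Int.band polynomial (1 <<< 0)
  else pvALoop polynomial.toNat x m 0 0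

-- ===== PORT B =====
def pvBLoop (p : Nat) (x m xi acc : Int) : Int :=
  if hp : p = 0 then acc
  else pvBLoop (p / 2) x m (PySem.Int.mod (xi * x) m)
    (if p % 2 = 1 then acc + xi else acc)
termination_by p
decreasing_by exact Nat.div_lt_self (Nat.pos_of_ne_zero hp) (by omega)

def calculate_polynomial_alt (polynomial : Int) (x : Int) (power : Int) : Int :=
  let m : Int := 2 ^ power.toNat
  if ¬ (0 ≤ x ∧ x < m - 1) then 0       -- ValueError, as in A; excluded by Pre_
  else pvBLoop polynomial.toNat x m 1 0

-- ===== PRECONDITION & SPEC =====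
-- Pre_ excludes the inputs on which Python A does not return normally — x outside
-- range(0, 2**power - 1) and power ≤ 0 (ValueError / TypeError), and polynomial < 0,
-- on which the while-loop 'polynomial >>= 1' never reaches 0 (A and B diverge); the one
-- exception, polynomial < 0 with x == 0 where A's early shortcut still returns the low
-- bit while B's loop diverges, is excluded with it.
def Pre_calculate_polynomial (polynomial : Int) (x : Int) (power : Int) : Prop :=
  0 ≤ polynomial ∧ 1 ≤ power ∧ 0 ≤ x ∧ x < 2 ^ power.toNat - 1
instance (polynomial : Int) (x : Int) (power : Int) : Decidable (Pre_calculate_polynomial polynomial x power) := by unfold Pre_calculate_polynomial; infer_instance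
def pvWitness_calculate_polynomial : Int × Int × Int := (13, 3, 3)

def Spec_calculate_polynomial (polynomial : Int) (x : Int) (power : Int) (out : Int) : Prop := out = calculate_polynomial_alt polynomial x power
instance (polynomial : Int) (x : Int) (power : Int) (out : Int) : Decidable (Spec_calculate_polynomial polynomial x power out) := by unfold Spec_calculate_polynomial; infer_instance

-- ===== CLAIM (what is proved, stated in full; the proofs are below) =====
def Claim_equal_calculate_polynomial : Prop := ∀ (polynomial : Int) (x : Int) (power : Int), Dom_calculate_polynomial polynomial x power → Pre_calculate_polynomial polynomial x power → Spec_calculate_polynomial polynomial x power (calculate_polynomial polynomial x power)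

-- ===== LEMMAS AND PROOFS =====

-- once xi is 0, B's loop only shifts: nothing is ever added
theorem pvBLoop_zero (p : Nat) (x m acc : Int) (hm : 0 < m) :
    pvBLoop p x m 0 acc = acc := by
  induction p using Nat.strong_induction_on generalizing acc with
  | _ p ih =>
    rw [pvBLoop]
    split
    · rfl
    · rename_i hp
      have h0 : PySem.Int.mod ((0 : Int) * x) m = 0 := by
        rw [PySem.Int.mod_eq_emod_of_pos hm]; simp
      have hacc : (if p % 2 = 1 then acc + 0 else acc) = acc := by split <;> simp
      rw [h0, hacc, ih (p / 2) (Nat.div_lt_self (Nat.pos_of_ne_zero hp) (by omega))]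

-- B at x = 0 returns the low bit (A's special case)
theorem pvBLoop_x_zero (p : Nat) (m acc : Int) (hm : 0 < m) :
    pvBLoop p 0 m 1 acc = acc + ((p % 2 : Nat) : Int) := by
  rw [pvBLoop]
  split
  · rename_i hp; subst hp; simp
  · rename_i hp
    have h0 : PySem.Int.mod ((1 : Int) * 0) m = 0 := by
      rw [PySem.Int.mod_eq_emod_of_pos hm]; simp
    rw [h0, pvBLoop_zero _ _ _ _ hm]
    have := Nat.mod_two_eq_zero_or_one p
    rcases this with h | h <;> simp [h]

-- main invariant: with xi = x^i % m and i ≥ 1, the two loops agree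
theorem pvLoop_agree (p : Nat) (x m : Int) (i : Nat) (s : Int)
    (hm : 0 < m) (hi : 1 ≤ i) :
    pvALoop p x m i s = pvBLoop p x m (x ^ i % m) s := by
  induction p using Nat.strong_induction_on generalizing i s with
  | _ p ih =>
    rw [pvALoop, pvBLoop]
    split
    · rfl
    · rename_i hp
      have hne : i ≠ 0 := by omega
      have hxi' : PySem.Int.mod (x ^ i % m * x) m = x ^ (i + 1) % m := by
        rw [PySem.Int.mod_eq_emod_of_pos hm, Int.mul_emod,
          Int.emod_emod_of_dvd _ dvd_rfl, ← Int.mul_emod, ← pow_succ]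
      rw [hxi']
      have hstep : (if i = 0 then s + ((p % 2 : Nat) : Int)
          else s + PySem.Int.mod ((x * ((p % 2 : Nat) : Int)) ^ i) m)
          = (if p % 2 = 1 then s + x ^ i % m else s) := by
        rcases Nat.mod_two_eq_zero_or_one p with h | h
        · simp [hne, h, zero_pow hne, PySem.Int.mod_eq_emod_of_pos hm]
        · simp [hne, h, PySem.Int.mod_eq_emod_of_pos hm]
      rw [hstep]
      exact ih (p / 2) (Nat.div_lt_self (Nat.pos_of_ne_zero hp) (by omega)) (i + 1) _ (by omega)

-- the two top-level functions agree on Pre_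
theorem pvTop (p : Nat) (x m : Int) (hm : 1 < m) (hx : 0 ≤ x) :
    (if x = 0 then (PySem.Int.band (p : Int) (1 <<< 0)) else pvALoop p x m 0 0)
      = pvBLoop p x m 1 0 := by
  have hm0 : (0 : Int) < m := by omega
  by_cases hx0 : x = 0
  · subst hx0
    rw [if_pos rfl, pvBLoop_x_zero _ _ _ hm0]
    have h1 : ((1 : Nat) <<< 0) = 1 := rfl
    rw [h1, PySem.Int.band_natCast, Nat.and_one_is_mod]
    simp
  · rw [if_neg hx0]
    rw [pvALoop, pvBLoop]
    split
    · rfl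
    · rename_i hp
      have hx1 : x ^ 1 % m = PySem.Int.mod ((1 : Int) * x) m := by
        rw [PySem.Int.mod_eq_emod_of_pos hm0]; ring_nf
      have hacc : ((0 : Int) + ((p % 2 : Nat) : Int))
          = (if p % 2 = 1 then (0 : Int) + 1 else 0) := by
        rcases Nat.mod_two_eq_zero_or_one p with h | h <;> simp [h]
      rw [if_pos rfl, hacc, ← hx1,
        pvLoop_agree (p / 2) x m 1 _ hm0 le_rfl]

-- ===== VERDICT (by name: the statement is the Claim_ definition above) =====
theorem calculate_polynomial_spec : Claim_equal_calculate_polynomial := by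
  intro polynomial x power _ hpre
  obtain ⟨hp, hpow, hx, hxm⟩ := hpre
  unfold Spec_calculate_polynomial calculate_polynomial calculate_polynomial_alt
  simp only []
  have hm : (1 : Int) < 2 ^ power.toNat := by
    have h1 : 1 ≤ power.toNat := by omega
    calc (1 : Int) < 2 ^ 1 := by norm_num
    _ ≤ 2 ^ power.toNat := by
        exact pow_le_pow_right₀ (by norm_num) h1
  have hc : ¬¬(0 ≤ x ∧ x < 2 ^ power.toNat - 1) := not_not_intro ⟨hx, hxm⟩
  rw [if_neg hc, if_neg hc]
  have := pvTop polynomial.toNat x (2 ^ power.toNat) hm hx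
  rw [← this, Int.toNat_of_nonneg hp]
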